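-- pv_equiv track=rewrite | github.com/Ublyudok-kun/reversi | revisarJugadas.py | revisar_superior_izquierda
-- ===== SOURCE A (Python) =====
-- def revisar_superior_izquierda(tablero, x, y, turno, dimension, jugadas_posibles):
--     if((x >0 and x<dimension) and (y>0 and y<dimension)):
--         try:
--             # diagonal superior izquierdo
--             if (tablero[x-1][y-1] == 0 and tablero[x][y] == (turno*-1)):
--                 jugadas_posibles.append((x-1, y-1))
--
--             elif (tablero[x-1][y-1] == (turno*-1)):
--                 revisar_superior_izquierda(tablero, x-1, y-1, turno, dimension, jugadas_posibles)
--         except: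
--             IndexError
--
--     return jugadas_posibles
-- ===== SOURCE B (Python) =====
-- def _step(tablero, turno, x, y):
--     """Classify the next up-left cell: ('add', cell) to record a move and stop,
--     ('walk', None) to keep walking, ('stop', None) otherwise (incl. out-of-board)."""
--     try:
--         prev = tablero[x - 1][y - 1]
--         if prev == 0 and tablero[x][y] == -turno:
--             return ('add', (x - 1, y - 1))
--         if prev == -turno:
--             return ('walk', None)
--         return ('stop', None)
--     except IndexError:
--         return ('stop', None)
--
--
-- def revisar_superior_izquierda(tablero, x, y, turno, dimension, jugadas_posibles):
--     while 0 < x < dimension and 0 < y < dimension: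
--         kind, cell = _step(tablero, turno, x, y)
--         if kind == 'add':
--             jugadas_posibles.append(cell)
--             break
--         if kind == 'stop':
--             break
--         x -= 1
--         y -= 1
--     return jugadas_posibles
-- ===== Notes on version B (the rewrite author's own statement) =====
-- stated objective: simpler
-- what changed: Replaces the tail recursion with a flat iterative walk along the diagonal, factoring the per-cell decision into a small step classifier instead of nested if/elif with recursion.
import Mathlib
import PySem

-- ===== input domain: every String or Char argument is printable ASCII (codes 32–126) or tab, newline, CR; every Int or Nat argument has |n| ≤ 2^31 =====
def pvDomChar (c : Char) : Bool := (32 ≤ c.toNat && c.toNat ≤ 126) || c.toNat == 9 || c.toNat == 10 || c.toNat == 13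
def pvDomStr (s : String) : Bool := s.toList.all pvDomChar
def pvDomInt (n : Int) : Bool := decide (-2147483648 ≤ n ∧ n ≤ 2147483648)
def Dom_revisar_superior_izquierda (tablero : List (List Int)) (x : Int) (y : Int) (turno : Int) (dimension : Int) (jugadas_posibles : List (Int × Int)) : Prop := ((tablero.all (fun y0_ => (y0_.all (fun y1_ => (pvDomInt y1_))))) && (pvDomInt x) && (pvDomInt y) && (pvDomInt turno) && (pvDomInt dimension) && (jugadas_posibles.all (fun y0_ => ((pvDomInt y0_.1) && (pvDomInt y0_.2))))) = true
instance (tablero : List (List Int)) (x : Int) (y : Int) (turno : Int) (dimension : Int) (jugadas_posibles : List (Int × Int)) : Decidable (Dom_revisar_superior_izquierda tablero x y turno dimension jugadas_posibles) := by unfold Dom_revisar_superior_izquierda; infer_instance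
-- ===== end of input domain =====

-- B replaces A's tail recursion by a flat iterative walk with a per-cell step classifier (simpler
-- decomposition, same cost); equivalence is about the RETURN value — both Pythons also append the
-- found move to `jugadas_posibles` in place.


-- ===== PORT A =====
def revisar_superior_izquierda (tablero : List (List Int)) (x : Int) (y : Int) (turno : Int) (dimension : Int) (jugadas_posibles : List (Int × Int)) : List (Int × Int) :=
  if h : 0 < x ∧ x < dimension ∧ 0 < y ∧ y < dimension then
    -- try block: any IndexError (none from pyGet?) is swallowed and the list returned
    match (PySem.List.pyGet? tablero (x - 1)).bind (fun r => PySem.List.pyGet? r (y - 1)) with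
    | none => jugadas_posibles
    | some a =>
      if a = 0 then
        match (PySem.List.pyGet? tablero x).bind (fun r => PySem.List.pyGet? r y) with
        | none => jugadas_posibles
        | some b =>
          if b = turno * (-1) then jugadas_posibles ++ [(x - 1, y - 1)]
          else if a = turno * (-1) then
            revisar_superior_izquierda tablero (x - 1) (y - 1) turno dimension jugadas_posibles
          else jugadas_posibles
      else if a = turno * (-1) then
        revisar_superior_izquierda tablero (x - 1) (y - 1) turno dimension jugadas_posibles
      else jugadas_posibles
  else jugadas_posibles
termination_by x.toNat
decreasing_by all_goals (have := h.1; omega)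

-- ===== PORT B =====
-- one step of B's while loop: classify the cell above-left of (x, y)
inductive RsiAction
  | add : Int × Int → RsiAction
  | walk : RsiAction
  | stop : RsiAction
deriving DecidableEq, Repr

def rsiStep (tablero : List (List Int)) (turno : Int) (x : Int) (y : Int) : RsiAction :=
  match (PySem.List.pyGet? tablero (x - 1)).bind (fun r => PySem.List.pyGet? r (y - 1)) with
  | none => .stop
  | some prev =>
    if prev = 0 then
      match (PySem.List.pyGet? tablero x).bind (fun r => PySem.List.pyGet? r y) with
      | none => .stop
      | some b =>
        if b = -turno then .add (x - 1, y - 1)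
        else if prev = -turno then .walk else .stop
    else if prev = -turno then .walk else .stop

-- B's while loop; the fuel x.toNat bounds the iterations (x decreases each pass,
-- and the loop guard needs 0 < x)
def rsiLoop (tablero : List (List Int)) (turno : Int) (dimension : Int) :
    Nat → Int → Int → List (Int × Int) → List (Int × Int)
  | 0, _, _, jp => jp
  | fuel + 1, x, y, jp =>
    if 0 < x ∧ x < dimension ∧ 0 < y ∧ y < dimension then
      match rsiStep tablero turno x y with
      | .add c => jp ++ [c]
      | .stop => jp
      | .walk => rsiLoop tablero turno dimension fuel (x - 1) (y - 1) jp
    else jp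

def revisar_superior_izquierda_alt (tablero : List (List Int)) (x : Int) (y : Int) (turno : Int) (dimension : Int) (jugadas_posibles : List (Int × Int)) : List (Int × Int) :=
  rsiLoop tablero turno dimension x.toNat x y jugadas_posibles

-- ===== PRECONDITION & SPEC =====
def Spec_revisar_superior_izquierda (tablero : List (List Int)) (x : Int) (y : Int) (turno : Int) (dimension : Int) (jugadas_posibles : List (Int × Int)) (out : List (Int × Int)) : Prop := out = revisar_superior_izquierda_alt tablero x y turno dimension jugadas_posibles
instance (tablero : List (List Int)) (x : Int) (y : Int) (turno : Int) (dimension : Int) (jugadas_posibles : List (Int × Int)) (out : List (Int × Int)) : Decidable (Spec_revisar_superior_izquierda tablero x y turno dimension jugadas_posibles out) := by unfold Spec_revisar_superior_izquierda; infer_instance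

-- ===== CLAIM (what is proved, stated in full; the proofs are below) =====
def Claim_equal_revisar_superior_izquierda : Prop := ∀ (tablero : List (List Int)) (x : Int) (y : Int) (turno : Int) (dimension : Int) (jugadas_posibles : List (Int × Int)), Dom_revisar_superior_izquierda tablero x y turno dimension jugadas_posibles → Spec_revisar_superior_izquierda tablero x y turno dimension jugadas_posibles (revisar_superior_izquierda tablero x y turno dimension jugadas_posibles)

-- ===== LEMMAS AND PROOFS =====

-- ===== VERDICT (by name: the statement is the Claim_ definition above) =====
-- A equals B's loop for any fuel ≥ x.toNat
theorem rsi_eq_loop (tablero : List (List Int)) (turno dimension : Int) :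
    ∀ (fuel : Nat) (x y : Int) (jp : List (Int × Int)), x.toNat ≤ fuel →
      revisar_superior_izquierda tablero x y turno dimension jp =
        rsiLoop tablero turno dimension fuel x y jp := by
  intro fuel
  induction fuel with
  | zero =>
    intro x y jp hx
    rw [revisar_superior_izquierda, rsiLoop]
    have : ¬ (0 < x ∧ x < dimension ∧ 0 < y ∧ y < dimension) := by omega
    simp [this]
  | succ n ih =>
    intro x y jp hx
    rw [revisar_superior_izquierda, rsiLoop]
    by_cases hg : 0 < x ∧ x < dimension ∧ 0 < y ∧ y < dimension
    · simp only [hg, rsiStep]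
      have hrec := ih (x - 1) (y - 1) jp (by omega)
      cases (PySem.List.pyGet? tablero (x - 1)).bind (fun r => PySem.List.pyGet? r (y - 1)) with
      | none => simp
      | some a =>
        by_cases ha : a = 0
        · simp only [if_pos ha]
          cases (PySem.List.pyGet? tablero x).bind (fun r => PySem.List.pyGet? r y) with
          | none => simp
          | some b =>
            by_cases hb : b = turno * (-1)
            · have hb' : b = -turno := by omega
              simp [hb']
            · have hb' : ¬ b = -turno := by omega
              by_cases ht : turno = 0
              · have h1 : a = turno * (-1) := by omega
                have h2 : a = -turno := by omega
                simp only [if_neg hb, if_neg hb', if_pos h1, if_pos h2]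
                simpa using hrec
              · have h1 : ¬ a = turno * (-1) := by omega
                have h2 : ¬ a = -turno := by omega
                simp [hb', h2]
        · by_cases ha2 : a = turno * (-1)
          · have ha2' : a = -turno := by omega
            simp only [if_neg ha, if_pos ha2, if_pos ha2']
            simpa using hrec
          · have ha2' : ¬ a = -turno := by omega
            simp [ha, ha2']
    · simp [hg]

theorem revisar_superior_izquierda_spec : Claim_equal_revisar_superior_izquierda := by
  intro tablero x y turno dimension jp _
  unfold Spec_revisar_superior_izquierda revisar_superior_izquierda_alt
  exact rsi_eq_loop tablero turno dimension x.toNat x y jp le_rfl
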